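-- pv_equiv track=rewrite | github.com/KrishnanN27/dp_dummy | p2.py | T_dp
-- ===== SOURCE A (Python) =====
-- def T_dp(segment_lengths):
--     n = 0
--     for i in segment_lengths:
--         n += 1
--     prefix_sum = [0]
--     dp = [[0] * n for _ in range(n)]
--
--     for i, length in enumerate(segment_lengths):
--         prefix_sum.append(prefix_sum[-1] + length)
--         dp[i][i] = length
--
--     for length in range(2, n + 1):
--         for i in range(n - length + 1):
--             j = i + length - 1
--             total_length = prefix_sum[j + 1] - prefix_sum[i]
--             dp[i][j] = total_length - min(dp[i + 1][j], dp[i][j - 1])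
--
--     return dp[0][n - 1]
-- ===== SOURCE B (Python) =====
-- def T_dp(segment_lengths):
--     # Top-down memoized recursion over intervals instead of A's bottom-up diagonal sweeps.
--     n = len(segment_lengths)
--     prefix_sum = [0]
--     for length in segment_lengths:
--         prefix_sum.append(prefix_sum[-1] + length)
--     memo = {}
--     def solve(i, j):
--         if i == j:
--             return segment_lengths[i]
--         if (i, j) in memo:
--             return memo[(i, j)]
--         best = min(solve(i + 1, j), solve(i, j - 1))
--         memo[(i, j)] = (prefix_sum[j + 1] - prefix_sum[i]) - best
--         return memo[(i, j)]
--     return solve(0, n - 1)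
-- ===== Notes on version B (the rewrite author's own statement) =====
-- stated objective: alternative
-- what changed: Replaces A's bottom-up fill of the n-by-n table by two nested length/offset sweeps with a top-down memoized recursion solve(i, j) over intervals, driven by the demanded subproblems instead of a fixed diagonal schedule.
import Mathlib
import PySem

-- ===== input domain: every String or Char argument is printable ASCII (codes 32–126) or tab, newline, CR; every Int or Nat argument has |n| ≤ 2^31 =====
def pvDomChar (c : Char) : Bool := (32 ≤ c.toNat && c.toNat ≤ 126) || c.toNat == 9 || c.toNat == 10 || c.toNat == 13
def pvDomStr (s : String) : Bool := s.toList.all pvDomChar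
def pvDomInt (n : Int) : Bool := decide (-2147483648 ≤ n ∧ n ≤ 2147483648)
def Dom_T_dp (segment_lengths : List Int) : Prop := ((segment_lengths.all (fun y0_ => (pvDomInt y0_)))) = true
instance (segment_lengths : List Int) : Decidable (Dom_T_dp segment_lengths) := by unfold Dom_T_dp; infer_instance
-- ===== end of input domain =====

-- B replaces A's bottom-up length/offset table sweeps with a top-down memoized
-- recursion over intervals (same recurrence, different evaluation strategy);
-- same return value, neither program mutates its argument.

-- ===== PORT A =====
-- literal transliteration of A: counting loop, prefix_sum + diagonal seeding loop,
-- two bottom-up length/offset loops over an n×n table.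
def T_dp (segment_lengths : List Int) : Int :=
  let n : Int := segment_lengths.foldl (fun acc _ => acc + 1) 0
  let st0 : List Int × List (List Int) :=
    (PySem.List.enumerate segment_lengths 0).foldl
      (fun st p =>
        (st.1 ++ [PySem.List.pyGetD st.1 (-1) 0 + p.2],
         PySem.List.pySetD st.2 p.1
           (PySem.List.pySetD (PySem.List.pyGetD st.2 p.1 []) p.1 p.2)))
      ([0], (PySem.List.pyRange 0 n 1).map (fun _ => List.replicate n.toNat 0))
  let prefix_sum := st0.1
  let dpF : List (List Int) :=
    (PySem.List.pyRange 2 (n + 1) 1).foldl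
      (fun dp L =>
        (PySem.List.pyRange 0 (n - L + 1) 1).foldl
          (fun dp i =>
            PySem.List.pySetD dp i
              (PySem.List.pySetD (PySem.List.pyGetD dp i []) (i + L - 1)
                ((PySem.List.pyGetD prefix_sum (i + L - 1 + 1) 0 -
                    PySem.List.pyGetD prefix_sum i 0) -
                  min (PySem.List.pyGetD (PySem.List.pyGetD dp (i + 1) []) (i + L - 1) 0)
                      (PySem.List.pyGetD (PySem.List.pyGetD dp i []) (i + L - 1 - 1) 0))))
          dp)
      st0.2
  PySem.List.pyGetD (PySem.List.pyGetD dpF 0 []) (n - 1) 0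

-- ===== PORT B =====
-- B's inner recursive helper 'solve(i, j)', threading the memo dictionary through the
-- two recursive calls in Python's evaluation order.  The Nat fuel is a termination
-- guard only: at every call B's Python makes it equals (j - i).toNat, so fuel 0 is
-- exactly Python's 'i == j' base case and each recursive call decrements it by one.
def pvSolve (segs prefix_sum : List Int) :
    Nat → Int → Int → PySem.Dict (Int × Int) Int → Int × PySem.Dict (Int × Int) Int
  | 0, i, _, memo => (PySem.List.pyGetD segs i 0, memo)  -- 'if i == j: return segment_lengths[i]' (index in range on every reachable call)
  | fuel + 1, i, j, memo =>
    match memo.get? (i, j) with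
    | some v => (v, memo)                                -- 'if (i, j) in memo: return memo[(i, j)]'
    | none =>
      let r1 := pvSolve segs prefix_sum fuel (i + 1) j memo
      let r2 := pvSolve segs prefix_sum fuel i (j - 1) r1.2
      let v := (PySem.List.pyGetD prefix_sum (j + 1) 0 -
                  PySem.List.pyGetD prefix_sum i 0) - min r1.1 r2.1
      (v, r2.2.insert (i, j) v)

-- literal transliteration of B: len, prefix loop, then solve(0, n - 1) on an empty memo.
def T_dp_alt (segment_lengths : List Int) : Int :=
  let n : Int := (segment_lengths.length : Int)
  let prefix_sum := segment_lengths.foldl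
    (fun ps x => ps ++ [PySem.List.pyGetD ps (-1) 0 + x]) [0]
  (pvSolve segment_lengths prefix_sum (n - 1).toNat 0 (n - 1) PySem.Dict.empty).1

-- ===== PRECONDITION & SPEC =====
-- Pre_ excludes only the empty list, on which A raises IndexError (and B RecursionError).
def Pre_T_dp (segment_lengths : List Int) : Prop := segment_lengths ≠ []
instance (segment_lengths : List Int) : Decidable (Pre_T_dp segment_lengths) := by
  unfold Pre_T_dp; infer_instance
def pvWitness_T_dp : List Int := ([3, 1, 2])

def Spec_T_dp (segment_lengths : List Int) (out : Int) : Prop := out = T_dp_alt segment_lengths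
instance (segment_lengths : List Int) (out : Int) : Decidable (Spec_T_dp segment_lengths out) := by
  unfold Spec_T_dp; infer_instance

-- ===== CLAIM (what is proved, stated in full; the proofs are below) =====
def Claim_equal_T_dp : Prop := ∀ (segment_lengths : List Int), Dom_T_dp segment_lengths → Pre_T_dp segment_lengths → Spec_T_dp segment_lengths (T_dp segment_lengths)

-- ===== LEMMAS AND PROOFS =====

-- Pure model: prefix sums, one diagonal step, the d-th diagonal of the DP,
-- and the interval value pvVal segs d i = dp[i][i+d].
def pvPS (segs : List Int) : List Int :=
  (List.range (segs.length + 1)).map (fun k => (segs.take k).sum)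

def pvStep (segs : List Int) (d : Nat) (cur : List Int) : List Int :=
  (List.range (segs.length - d)).map (fun i =>
    ((segs.take (i + d + 1)).sum - (segs.take i).sum) -
      min (cur.getD (i + 1) 0) (cur.getD i 0))

def pvDiag (segs : List Int) : Nat → List Int
  | 0 => segs
  | d + 1 => pvStep segs (d + 1) (pvDiag segs d)

def pvVal (segs : List Int) : Nat → Nat → Int
  | 0, i => segs.getD i 0
  | d + 1, i => ((segs.take (i + d + 2)).sum - (segs.take i).sum) -
      min (pvVal segs d (i + 1)) (pvVal segs d i)

def pvInv (segs : List Int) (D : Nat) (dp : List (List Int)) : Prop :=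
  dp.length = segs.length ∧
  (∀ r, r < segs.length → (dp.getD r []).length = segs.length) ∧
  (∀ k i, k ≤ D → i + k < segs.length →
    (dp.getD i []).getD (i + k) 0 = (pvDiag segs k).getD i 0)

-- memo invariant for B: every entry is a correctly-valued in-range interval
def pvMemoOK (segs : List Int) (m : PySem.Dict (Int × Int) Int) : Prop :=
  ∀ p v, m.get? p = some v →
    ∃ i d : Nat, p.1 = (i : Int) ∧ p.2 = ((i + d : Nat) : Int) ∧
      i + d < segs.length ∧ v = pvVal segs d i

lemma pv_count (l : List Int) (c : Int) :
    l.foldl (fun acc _ => acc + 1) c = c + l.length := by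
  induction l generalizing c with
  | nil => simp
  | cons x l ih => simp [List.foldl, ih]; ring

lemma pv_prefix_fold (l : List Int) : ∀ (ps : List Int) (c : Int) (h : ps ≠ []),
    ps.getLast h = c →
    l.foldl (fun ps x => ps ++ [PySem.List.pyGetD ps (-1) 0 + x]) ps =
      ps ++ (List.range l.length).map (fun k => c + (l.take (k + 1)).sum) := by
  induction l with
  | nil => intro ps c h hc; simp
  | cons x l ih =>
    intro ps c h hc
    have hget : PySem.List.pyGetD ps (-1) 0 = c := by
      rw [PySem.List.pyGetD_neg_one ps 0 h, hc]
    simp only [List.foldl, hget]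
    rw [ih (ps ++ [c + x]) (c + x) (by simp) (by simp)]
    rw [List.append_assoc]
    congr 1
    simp only [List.length_cons, List.range_succ_eq_map, List.map_cons, List.map_map,
      List.singleton_append]
    congr 1
    · simp
    · apply List.map_congr_left
      intro k _
      simp only [Function.comp_apply, Nat.succ_eq_add_one, List.take_succ_cons, List.sum_cons]
      ring

lemma pv_prefix_eq_PS (segs : List Int) :
    segs.foldl (fun ps x => ps ++ [PySem.List.pyGetD ps (-1) 0 + x]) [0] = pvPS segs := by
  rw [pv_prefix_fold segs [0] 0 (by simp) (by simp)]
  unfold pvPS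
  rw [List.range_succ_eq_map]
  simp only [List.map_cons, List.map_map, List.take_zero, List.sum_nil]
  apply List.ext_getElem <;> simp
  · intro i hi _
    cases i with
    | zero => simp
    | succ i => simp [Nat.succ_eq_add_one]

lemma pv_getD_map_range (f : Nat → Int) (N m : Nat) (h : m < N) :
    ((List.range N).map f).getD m 0 = f m := by
  rw [List.getD_eq_getElem?_getD, List.getElem?_map, List.getElem?_range h]
  simp

lemma pv_PS_getD (segs : List Int) (k : Nat) (hk : k ≤ segs.length) :
    PySem.List.pyGetD (pvPS segs) (k : Int) 0 = (segs.take k).sum := by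
  rw [PySem.List.pyGetD_natCast]
  unfold pvPS
  exact pv_getD_map_range _ _ _ (by omega)

lemma pv_pair_fold (l : List Int) : ∀ (s : Int) (ps : List Int) (dp : List (List Int)),
    (PySem.List.enumerate l s).foldl
      (fun st p =>
        (st.1 ++ [PySem.List.pyGetD st.1 (-1) 0 + p.2],
         PySem.List.pySetD st.2 p.1
           (PySem.List.pySetD (PySem.List.pyGetD st.2 p.1 []) p.1 p.2)))
      (ps, dp) =
    (l.foldl (fun ps x => ps ++ [PySem.List.pyGetD ps (-1) 0 + x]) ps,
     (PySem.List.enumerate l s).foldl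
       (fun dp p => PySem.List.pySetD dp p.1
         (PySem.List.pySetD (PySem.List.pyGetD dp p.1 []) p.1 p.2)) dp) := by
  induction l with
  | nil => intro s ps dp; simp [PySem.List.enumerate_nil]
  | cons x l ih =>
    intro s ps dp
    simp only [PySem.List.enumerate_cons, List.foldl_cons]
    rw [ih]

-- the table after the seeding loop: rows keep shape, the main diagonal holds the segments
lemma pv_seed (l : List Int) : ∀ (s : Nat) (dp : List (List Int)) (N : Nat),
    dp.length = N → (∀ r, r < N → (dp.getD r []).length = N) → s + l.length ≤ N →
    ∀ res, res = (PySem.List.enumerate l (s : Int)).foldl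
        (fun dp p => PySem.List.pySetD dp p.1
          (PySem.List.pySetD (PySem.List.pyGetD dp p.1 []) p.1 p.2)) dp →
    res.length = N ∧ (∀ r, r < N → (res.getD r []).length = N) ∧
    (∀ i, i < s → res.getD i [] = dp.getD i []) ∧
    (∀ k, k < l.length → (res.getD (s + k) []).getD (s + k) 0 = l.getD k 0) := by
  induction l with
  | nil =>
    intro s dp N h1 h2 _ res hres
    rw [hres]
    simp only [PySem.List.enumerate_nil, List.foldl_nil]
    refine ⟨h1, h2, ?_, ?_⟩
    · simp
    · simp
  | cons x l ih =>
    intro s dp N h1 h2 h3 res hres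
    have hsN : s < N := by simp at h3; omega
    rw [hres, PySem.List.enumerate_cons, List.foldl_cons]
    set dp' : List (List Int) :=
      PySem.List.pySetD dp ((s : Nat) : Int)
        (PySem.List.pySetD (PySem.List.pyGetD dp ((s : Nat) : Int) []) ((s : Nat) : Int) x)
      with hdp'
    have hdp'eq : dp' = dp.set s ((dp.getD s []).set s x) := by
      rw [hdp', PySem.List.pyGetD_natCast, PySem.List.pySetD_natCast, PySem.List.pySetD_natCast]
    have hlen' : dp'.length = N := by rw [hdp'eq]; simp [h1]
    have hrow_m : dp'.getD s [] = (dp.getD s []).set s x := by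
      rw [hdp'eq, List.getD_eq_getElem?_getD, List.getElem?_set, if_pos rfl,
        if_pos (by omega), Option.getD_some]
    have hrow_other : ∀ r, r ≠ s → dp'.getD r [] = dp.getD r [] := by
      intro r hr
      rw [hdp'eq, List.getD_eq_getElem?_getD, List.getElem?_set, if_neg (by omega),
        ← List.getD_eq_getElem?_getD]
    have hrow' : ∀ r, r < N → (dp'.getD r []).length = N := by
      intro r hr
      by_cases hrs : r = s
      · subst hrs; rw [hrow_m, List.length_set]; exact h2 r hr
      · rw [hrow_other r hrs]; exact h2 r hr
    have hcast : ((s : Nat) : Int) + 1 = (((s + 1 : Nat)) : Int) := by push_cast; ring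
    rw [hcast]
    have hmain := ih (s + 1) dp' N hlen' hrow' (by simp at h3 ⊢; omega) _ rfl
    refine ⟨hmain.1, hmain.2.1, ?_, ?_⟩
    · intro i hi
      rw [hmain.2.2.1 i (by omega), hrow_other i (by omega)]
    · intro k hk
      match k with
      | 0 =>
        simp only [Nat.add_zero]
        rw [hmain.2.2.1 s (by omega), hrow_m, List.getD_eq_getElem?_getD,
          List.getElem?_set, if_pos rfl, if_pos (by rw [h2 s hsN]; omega), Option.getD_some]
        rfl
      | k + 1 =>
        have := hmain.2.2.2 k (by simpa using Nat.lt_of_succ_lt_succ hk)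
        rw [show s + 1 + k = s + (k + 1) by omega] at this
        simpa using this

-- one inner pass at diagonal index d: processes offsets m, m+1, …, n-d-1
lemma pv_inner (segs : List Int) (d : Nat) (hd : 1 ≤ d) (hdn : d < segs.length) :
    ∀ (t m : Nat) (dp : List (List Int)),
    m + t = segs.length - d →
    dp.length = segs.length →
    (∀ r, r < segs.length → (dp.getD r []).length = segs.length) →
    (∀ k i, k < d → i + k < segs.length →
        (dp.getD i []).getD (i + k) 0 = (pvDiag segs k).getD i 0) →
    (∀ i, i < m → (dp.getD i []).getD (i + d) 0 = (pvDiag segs d).getD i 0) →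
    ∀ res, res = (PySem.List.pyRange ((m : Nat) : Int) (((segs.length - d : Nat)) : Int) 1).foldl
        (fun dp i =>
          PySem.List.pySetD dp i
            (PySem.List.pySetD (PySem.List.pyGetD dp i []) (i + ((d + 1 : Nat) : Int) - 1)
              ((PySem.List.pyGetD (pvPS segs) (i + ((d + 1 : Nat) : Int) - 1 + 1) 0 -
                  PySem.List.pyGetD (pvPS segs) i 0) -
                min (PySem.List.pyGetD (PySem.List.pyGetD dp (i + 1) [])
                      (i + ((d + 1 : Nat) : Int) - 1) 0)
                    (PySem.List.pyGetD (PySem.List.pyGetD dp i [])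
                      (i + ((d + 1 : Nat) : Int) - 1 - 1) 0))))
        dp →
    res.length = segs.length ∧
    (∀ r, r < segs.length → (res.getD r []).length = segs.length) ∧
    (∀ k i, k < d → i + k < segs.length →
        (res.getD i []).getD (i + k) 0 = (pvDiag segs k).getD i 0) ∧
    (∀ i, i < segs.length - d →
        (res.getD i []).getD (i + d) 0 = (pvDiag segs d).getD i 0) := by
  set n := segs.length with hn
  intro t
  induction t with
  | zero =>
    intro m dp hm hlen hrow hk hm' res hres
    rw [hres, PySem.List.pyRange_one_eq_nil (by exact_mod_cast Nat.le_of_eq (by omega)),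
      List.foldl_nil]
    exact ⟨hlen, hrow, hk, fun i hi => hm' i (by omega)⟩
  | succ t iht =>
    intro m dp hm hlen hrow hk hm' res hres
    have hmlt : m < n - d := by omega
    rw [hres, PySem.List.pyRange_one_cons (by exact_mod_cast hmlt), List.foldl_cons]
    have hj : ((m : Nat) : Int) + ((d + 1 : Nat) : Int) - 1 = ((m + d : Nat) : Int) := by
      push_cast; ring
    have hj1 : ((m : Nat) : Int) + ((d + 1 : Nat) : Int) - 1 + 1 = ((m + d + 1 : Nat) : Int) := by
      push_cast; ring
    have hjm1 : ((m : Nat) : Int) + ((d + 1 : Nat) : Int) - 1 - 1 =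
        ((m + (d - 1) : Nat) : Int) := by push_cast; omega
    have hi1 : ((m : Nat) : Int) + 1 = ((m + 1 : Nat) : Int) := by push_cast; ring
    have hread1 : PySem.List.pyGetD (PySem.List.pyGetD dp (((m : Nat) : Int) + 1) [])
        (((m : Nat) : Int) + ((d + 1 : Nat) : Int) - 1) 0 =
        (pvDiag segs (d - 1)).getD (m + 1) 0 := by
      rw [hi1, hj, PySem.List.pyGetD_natCast, PySem.List.pyGetD_natCast]
      have := hk (d - 1) (m + 1) (by omega) (by omega)
      rwa [show m + 1 + (d - 1) = m + d by omega] at this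
    have hread2 : PySem.List.pyGetD (PySem.List.pyGetD dp ((m : Nat) : Int) [])
        (((m : Nat) : Int) + ((d + 1 : Nat) : Int) - 1 - 1) 0 =
        (pvDiag segs (d - 1)).getD m 0 := by
      rw [hjm1, PySem.List.pyGetD_natCast, PySem.List.pyGetD_natCast]
      exact hk (d - 1) m (by omega) (by omega)
    have hval : (PySem.List.pyGetD (pvPS segs)
          (((m : Nat) : Int) + ((d + 1 : Nat) : Int) - 1 + 1) 0 -
          PySem.List.pyGetD (pvPS segs) ((m : Nat) : Int) 0) -
        min (PySem.List.pyGetD (PySem.List.pyGetD dp (((m : Nat) : Int) + 1) [])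
              (((m : Nat) : Int) + ((d + 1 : Nat) : Int) - 1) 0)
            (PySem.List.pyGetD (PySem.List.pyGetD dp ((m : Nat) : Int) [])
              (((m : Nat) : Int) + ((d + 1 : Nat) : Int) - 1 - 1) 0) =
        (pvDiag segs d).getD m 0 := by
      have hdd : pvDiag segs d = pvStep segs d (pvDiag segs (d - 1)) := by
        cases d with
        | zero => omega
        | succ d' => simp [pvDiag]
      rw [hdd]
      unfold pvStep
      rw [pv_getD_map_range _ _ _ (show m < segs.length - d by omega)]
      rw [hread1, hread2, hj1, pv_PS_getD segs (m + d + 1) (by omega),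
        pv_PS_getD segs m (by omega)]
    rw [hval, hj, hi1]
    set dp' : List (List Int) :=
      PySem.List.pySetD dp ((m : Nat) : Int)
        (PySem.List.pySetD (PySem.List.pyGetD dp ((m : Nat) : Int) []) ((m + d : Nat) : Int)
          ((pvDiag segs d).getD m 0)) with hdp'
    have hdp'eq : dp' = dp.set m ((dp.getD m []).set (m + d) ((pvDiag segs d).getD m 0)) := by
      rw [hdp', PySem.List.pyGetD_natCast, PySem.List.pySetD_natCast, PySem.List.pySetD_natCast]
    have hrow_m : dp'.getD m [] = (dp.getD m []).set (m + d) ((pvDiag segs d).getD m 0) := by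
      rw [hdp'eq, List.getD_eq_getElem?_getD, List.getElem?_set, if_pos rfl,
        if_pos (by omega), Option.getD_some]
    have hrow_other : ∀ r, r ≠ m → dp'.getD r [] = dp.getD r [] := by
      intro r hr
      rw [hdp'eq, List.getD_eq_getElem?_getD, List.getElem?_set, if_neg (by omega),
        ← List.getD_eq_getElem?_getD]
    have hlen' : dp'.length = n := by rw [hdp'eq]; simp [hlen]
    have hrow' : ∀ r, r < n → (dp'.getD r []).length = n := by
      intro r hr
      by_cases hrm : r = m
      · subst hrm; rw [hrow_m, List.length_set]; exact hrow r hr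
      · rw [hrow_other r hrm]; exact hrow r hr
    have hk' : ∀ k i, k < d → i + k < n →
        (dp'.getD i []).getD (i + k) 0 = (pvDiag segs k).getD i 0 := by
      intro k i hkd hik
      by_cases him : i = m
      · rw [him, hrow_m, List.getD_eq_getElem?_getD, List.getElem?_set,
          if_neg (by omega), ← List.getD_eq_getElem?_getD, ← him]
        exact hk k i hkd hik
      · rw [hrow_other i him]; exact hk k i hkd hik
    have hm'' : ∀ i, i < m + 1 → (dp'.getD i []).getD (i + d) 0 = (pvDiag segs d).getD i 0 := by
      intro i hi
      by_cases him : i = m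
      · rw [him, hrow_m, List.getD_eq_getElem?_getD, List.getElem?_set, if_pos rfl,
          if_pos (by rw [hrow m (by omega)]; omega), Option.getD_some]
      · rw [hrow_other i him]; exact hm' i (by omega)
    exact iht (m + 1) dp' (by omega) hlen' hrow' hk' hm'' _ rfl

-- the outer loop of A, from diagonal index d+1 up to n-1
lemma pv_outer_A (segs : List Int) (hne : 1 ≤ segs.length) :
    ∀ (t d : Nat) (dp : List (List Int)), d + t = segs.length - 1 →
    pvInv segs d dp →
    ∀ res, res = (PySem.List.pyRange ((d + 2 : Nat) : Int) ((segs.length : Int) + 1) 1).foldl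
        (fun dp L =>
          (PySem.List.pyRange 0 ((segs.length : Int) - L + 1) 1).foldl
            (fun dp i =>
              PySem.List.pySetD dp i
                (PySem.List.pySetD (PySem.List.pyGetD dp i []) (i + L - 1)
                  ((PySem.List.pyGetD (pvPS segs) (i + L - 1 + 1) 0 -
                      PySem.List.pyGetD (pvPS segs) i 0) -
                    min (PySem.List.pyGetD (PySem.List.pyGetD dp (i + 1) []) (i + L - 1) 0)
                        (PySem.List.pyGetD (PySem.List.pyGetD dp i []) (i + L - 1 - 1) 0))))
            dp)
        dp →
    pvInv segs (segs.length - 1) res := by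
  set n := segs.length with hn
  intro t
  induction t with
  | zero =>
    intro d dp hd hInv res hres
    rw [hres, PySem.List.pyRange_one_eq_nil (by push_cast; omega), List.foldl_nil]
    rwa [show n - 1 = d by omega]
  | succ t iht =>
    intro d dp hd hInv res hres
    have hdlt : d + 1 < n := by omega
    rw [hres, PySem.List.pyRange_one_cons (by push_cast; omega), List.foldl_cons]
    have hb : (n : Int) - ((d + 2 : Nat) : Int) + 1 = ((n - (d + 1) : Nat) : Int) := by
      push_cast; omega
    rw [hb]
    have hz : (0 : Int) = ((0 : Nat) : Int) := by norm_num
    rw [hz]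
    have hinner := pv_inner segs (d + 1) (by omega) hdlt (n - (d + 1)) 0 dp (by omega)
      hInv.1 hInv.2.1 (fun k i hkd hik => hInv.2.2 k i (by omega) hik)
      (fun i hi => absurd hi (by omega)) _ rfl
    have hcast3 : ((d + 2 : Nat) : Int) + 1 = ((d + 1 + 2 : Nat) : Int) := by push_cast; ring
    rw [hcast3]
    refine iht (d + 1) _ (by omega) ⟨hinner.1, hinner.2.1, ?_⟩ _ rfl
    intro k i hkD hik
    rcases Nat.lt_or_ge k (d + 1) with hlt | hge
    · exact hinner.2.2.1 k i hlt hik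
    · rw [show k = d + 1 by omega] at hik ⊢
      exact hinner.2.2.2 i (by omega)

-- the diagonal table agrees with the interval value pvVal
lemma pv_diag_eq_val (segs : List Int) :
    ∀ (d i : Nat), i + d < segs.length →
    (pvDiag segs d).getD i 0 = pvVal segs d i := by
  intro d
  induction d with
  | zero => intro i _; simp [pvDiag, pvVal]
  | succ d ih =>
    intro i hi
    show (pvStep segs (d + 1) (pvDiag segs d)).getD i 0 = _
    unfold pvStep
    rw [pv_getD_map_range _ _ _ (show i < segs.length - (d + 1) by omega)]
    rw [ih (i + 1) (by omega), ih i (by omega)]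
    show _ = ((segs.take (i + d + 2)).sum - (segs.take i).sum) - _
    rw [show i + (d + 1) + 1 = i + d + 2 by omega]

-- B's memoized recursion computes pvVal and preserves the memo invariant
lemma pv_solve_ok (segs : List Int) :
    ∀ (d i : Nat) (m : PySem.Dict (Int × Int) Int), i + d < segs.length →
    pvMemoOK segs m →
    (pvSolve segs (pvPS segs) d (i : Int) ((i + d : Nat) : Int) m).1 = pvVal segs d i ∧
    pvMemoOK segs (pvSolve segs (pvPS segs) d (i : Int) ((i + d : Nat) : Int) m).2 := by
  intro d
  induction d with
  | zero =>
    intro i m hi hm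
    simp only [pvSolve, PySem.List.pyGetD_natCast]
    exact ⟨rfl, hm⟩
  | succ d ih =>
    intro i m hi hm
    show ((match m.get? ((i : Int), ((i + (d + 1) : Nat) : Int)) with
      | some v => _ | none => _) : Int × PySem.Dict (Int × Int) Int).1 = _ ∧ _
    cases hget : m.get? ((i : Int), ((i + (d + 1) : Nat) : Int)) with
    | some v =>
      obtain ⟨i', d', h1, h2, _, h4⟩ := hm _ _ hget
      simp only at h1 h2
      have hi' : i' = i := by exact_mod_cast h1.symm
      have hd' : d' = d + 1 := by
        have : i + (d + 1) = i' + d' := by exact_mod_cast h2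
        omega
      subst hi'; rw [hd'] at h4
      simp only [pvSolve, hget]
      exact ⟨h4, hm⟩
    | none =>
      have hc1 : ((i : Int) + 1) = ((i + 1 : Nat) : Int) := by push_cast; ring
      have hc2 : ((i + (d + 1) : Nat) : Int) = (((i + 1) + d : Nat) : Int) := by push_cast; ring
      have hc3 : ((i + (d + 1) : Nat) : Int) - 1 = ((i + d : Nat) : Int) := by push_cast; ring
      have h1 := ih (i + 1) m (by omega) hm
      rw [← hc1, ← hc2] at h1
      have h2 := ih i (pvSolve segs (pvPS segs) d ((i : Int) + 1)
          ((i + (d + 1) : Nat) : Int) m).2 (by omega) h1.2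
      rw [← hc3] at h2
      have hc4 : ((i + (d + 1) : Nat) : Int) + 1 = ((i + d + 2 : Nat) : Int) := by push_cast; ring
      simp only [pvSolve, hget]
      constructor
      · rw [h1.1, h2.1, hc4, pv_PS_getD segs (i + d + 2) (by omega),
          pv_PS_getD segs i (by omega)]
        rfl
      · intro p v hpv
        rw [PySem.Dict.get?_insert] at hpv
        split_ifs at hpv with hp
        · refine ⟨i, d + 1, by rw [hp], by rw [hp], by omega, ?_⟩
          rw [h1.1, h2.1, hc4, pv_PS_getD segs (i + d + 2) (by omega),
            pv_PS_getD segs i (by omega)] at hpv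
          injection hpv with hv
          rw [← hv]; rfl
        · exact h2.2 p v hpv

-- ===== VERDICT (by name: the statement is the Claim_ definition above) =====
theorem T_dp_spec : Claim_equal_T_dp := by
  intro segs _ hpre
  have hne : 1 ≤ segs.length := by
    cases segs with
    | nil => exact absurd rfl hpre
    | cons x l => simp
  unfold Spec_T_dp T_dp T_dp_alt
  have hcount : segs.foldl (fun acc _ => acc + 1) (0 : Int) = (segs.length : Int) := by
    rw [pv_count]; omega
  simp only [hcount, Int.toNat_natCast]
  rw [pv_pair_fold segs 0 [0]
    ((PySem.List.pyRange 0 (segs.length : Int) 1).map (fun _ => List.replicate segs.length 0))]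
  simp only []
  rw [pv_prefix_eq_PS segs]
  -- the fresh zero table
  set dp00 : List (List Int) :=
    (PySem.List.pyRange 0 (segs.length : Int) 1).map
      (fun _ => List.replicate segs.length (0 : Int)) with hdp00
  have hdp00len : dp00.length = segs.length := by
    rw [hdp00, List.length_map, PySem.List.length_pyRange_one]; omega
  have hdp00row : ∀ r, r < segs.length → (dp00.getD r []).length = segs.length := by
    intro r hr
    have hr' : r < (PySem.List.pyRange 0 (segs.length : Int) 1).length := by
      rw [PySem.List.length_pyRange_one]; omega
    rw [hdp00, List.getD_eq_getElem?_getD, List.getElem?_map,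
      List.getElem?_eq_getElem hr']
    simp
  -- the seeded table
  set dp0 := (PySem.List.enumerate segs (0 : Int)).foldl
      (fun dp p => PySem.List.pySetD dp p.1
        (PySem.List.pySetD (PySem.List.pyGetD dp p.1 []) p.1 p.2)) dp00 with hdp0
  have hseed := pv_seed segs 0 dp00 segs.length hdp00len hdp00row (by omega) dp0
    (by rw [hdp0]; norm_num)
  have hInv0 : pvInv segs 0 dp0 := by
    refine ⟨hseed.1, hseed.2.1, ?_⟩
    intro k i hk hik
    rw [show k = 0 by omega]
    have := hseed.2.2.2 i (by omega)
    simpa [pvDiag, List.getD_eq_getElem?_getD] using this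
  -- A's outer loop
  have hA := pv_outer_A segs hne (segs.length - 1) 0 dp0 (by omega) hInv0 _ rfl
  rw [show (2 : Int) = ((0 + 2 : Nat) : Int) by norm_num]
  rw [show ((segs.length : Int) - 1) = ((segs.length - 1 : Nat) : Int) by omega,
    PySem.List.pyGetD_natCast, PySem.List.pyGetD_zero]
  have hAval := hA.2.2 (segs.length - 1) 0 (le_refl _) (by omega)
  simp only [Nat.zero_add] at hAval
  rw [hAval, pv_diag_eq_val segs (segs.length - 1) 0 (by omega)]
  -- B's memoized recursion
  have hB := pv_solve_ok segs (segs.length - 1) 0 PySem.Dict.empty (by omega)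
    (by intro p v h; rw [PySem.Dict.get?_empty] at h; exact absurd h (by simp))
  simp only [Nat.cast_zero, Nat.zero_add] at hB
  simp only [Int.toNat_natCast]
  rw [hB.1]
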